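-- pv_equiv track=rewrite | github.com/jabnow/CS_1134_HWs | CS 1134/cs_hw_files/hw4_all.py | list_min
-- ===== SOURCE A (Python) =====
-- def list_min(lst, low, high):
--     # if the list is 1 element
--     # create a variable for current min value
--     # if the lst[low] < min value
--     # recursive step
--     # do it for left and right sides --> better runtime
--     if low >= high:
--         return lst[low]
--     mid = (low + high) // 2
--     left_min = list_min(lst, low, mid)
--     right_min = list_min(lst, mid+1, high)
--     if left_min > right_min:
--         return right_min
--     else:
--         return left_min
-- ===== SOURCE B (Python) =====
-- def list_min(lst, low, high):
--     m = lst[low]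
--     for i in range(low + 1, high + 1):
--         if lst[i] < m:
--             m = lst[i]
--     return m
-- ===== Notes on version B (the rewrite author's own statement) =====
-- stated objective: simpler
-- what changed: Replaced the divide-and-conquer binary recursion over [low,high] with a single iterative scan keeping a running minimum.
import Mathlib
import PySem

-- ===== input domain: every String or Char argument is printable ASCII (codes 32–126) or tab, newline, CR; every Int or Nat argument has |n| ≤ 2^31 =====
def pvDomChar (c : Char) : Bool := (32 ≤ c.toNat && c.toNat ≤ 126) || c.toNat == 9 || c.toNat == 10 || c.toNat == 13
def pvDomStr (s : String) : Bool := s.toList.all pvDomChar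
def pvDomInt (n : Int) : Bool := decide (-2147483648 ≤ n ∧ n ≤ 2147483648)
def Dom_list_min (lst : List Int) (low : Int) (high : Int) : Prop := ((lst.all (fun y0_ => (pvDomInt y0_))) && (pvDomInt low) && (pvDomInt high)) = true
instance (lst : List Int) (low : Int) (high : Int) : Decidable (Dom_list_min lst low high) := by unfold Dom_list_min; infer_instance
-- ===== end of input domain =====

-- B replaces A's binary recursion by one iterative running-minimum scan (simpler; same value everywhere A returns).

-- ===== PORT A =====
-- literal port of A; lst[low] out of range is an IndexError in Python, excluded by Pre_ (getD 0 is the junk value there)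
def list_min (lst : List Int) (low : Int) (high : Int) : Int :=
  if low ≥ high then (PySem.List.pyGet? lst low).getD 0
  else
    let mid := PySem.Int.floordiv (low + high) 2
    let left_min := list_min lst low mid
    let right_min := list_min lst (mid + 1) high
    if left_min > right_min then right_min else left_min
termination_by (high - low).toNat
decreasing_by
  all_goals
    have hlt : low < high := by omega
    have h1 := PySem.Int.floordiv_two_mid_bounds (lo := low) (hi := high) (le_of_lt hlt)
    have h2 := (PySem.Int.floordiv_lt_iff_lt_mul (a := low + high) (b := 2) (q := high)
      (by omega)).mpr (by omega)
    omega

-- ===== PORT B =====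
-- literal port of Source B: m = lst[low]; for i in range(low+1, high+1): if lst[i] < m: m = lst[i]
def list_min_alt (lst : List Int) (low : Int) (high : Int) : Int :=
  (PySem.List.pyRange (low + 1) (high + 1) 1).foldl
    (fun m i => if (PySem.List.pyGet? lst i).getD 0 < m then (PySem.List.pyGet? lst i).getD 0 else m)
    ((PySem.List.pyGet? lst low).getD 0)

-- ===== PRECONDITION & SPEC =====
-- Pre_ is exactly the set of inputs on which Python A returns (every index it touches lies in [-len, len)).
def Pre_list_min (lst : List Int) (low : Int) (high : Int) : Prop :=
  -(lst.length : Int) ≤ low ∧ low < lst.length ∧ high < lst.length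
instance (lst : List Int) (low : Int) (high : Int) : Decidable (Pre_list_min lst low high) := by
  unfold Pre_list_min; infer_instance
def pvWitness_list_min : List Int × Int × Int := ([3, 1, 2], 0, 2)

def Spec_list_min (lst : List Int) (low : Int) (high : Int) (out : Int) : Prop := out = list_min_alt lst low high
instance (lst : List Int) (low : Int) (high : Int) (out : Int) : Decidable (Spec_list_min lst low high out) := by unfold Spec_list_min; infer_instance

-- ===== CLAIM (what is proved, stated in full; the proofs are below) =====
def Claim_equal_list_min : Prop := ∀ (lst : List Int) (low : Int) (high : Int), Dom_list_min lst low high → Pre_list_min lst low high → Spec_list_min lst low high (list_min lst low high)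

-- ===== LEMMAS AND PROOFS =====

-- pvG lst i : the (total) value Python reads at lst[i]
def pvG (lst : List Int) (i : Int) : Int := (PySem.List.pyGet? lst i).getD 0

-- pvS n lst low = min of pvG over low, low+1, ..., low+n
def pvS : Nat → List Int → Int → Int
  | 0, lst, low => pvG lst low
  | n + 1, lst, low => min (pvG lst low) (pvS n lst (low + 1))

theorem pvS_split (lst : List Int) (n m : Nat) (low : Int) :
    pvS (n + m + 1) lst low = min (pvS n lst low) (pvS m lst (low + (n : Int) + 1)) := by
  induction n generalizing low with
  | zero => simp [pvS]
  | succ k ih =>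
      have h1 : k + 1 + m + 1 = (k + m + 1) + 1 := by omega
      rw [h1]
      show min (pvG lst low) (pvS (k + m + 1) lst (low + 1)) = _
      rw [ih (low + 1), ← min_assoc]
      show _ = min (min (pvG lst low) (pvS k lst (low + 1))) (pvS m lst (low + ((k : Int) + 1) + 1))
      have h2 : low + 1 + (k : Int) + 1 = low + ((k : Int) + 1) + 1 := by ring
      rw [h2]

-- A computes pvS on [low, high]
theorem list_min_eq_pvS (lst : List Int) (low high : Int) (h : low ≤ high) :
    list_min lst low high = pvS (high - low).toNat lst low := by
  by_cases heq : low = high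
  · subst heq
    rw [list_min]
    simp [pvS, pvG]
  · have hlt : low < high := lt_of_le_of_ne h heq
    have hmid := PySem.Int.floordiv_two_mid_bounds (lo := low) (hi := high) h
    set mid := PySem.Int.floordiv (low + high) 2 with hm
    have hmlt : mid < high :=
      (PySem.Int.floordiv_lt_iff_lt_mul (a := low + high) (b := 2) (q := high)
        (by omega)).mpr (by omega)
    rw [list_min]
    simp only [ge_iff_le, if_neg (not_le.mpr hlt)]
    rw [list_min_eq_pvS lst low mid hmid.1]
    rw [list_min_eq_pvS lst (mid + 1) high (by omega)]
    have hn : (high - low).toNat = (mid - low).toNat + (high - (mid + 1)).toNat + 1 := by omega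
    rw [hn, pvS_split]
    have hcast : low + ((mid - low).toNat : Int) + 1 = mid + 1 := by omega
    rw [hcast]
    rcases le_or_gt (pvS (mid - low).toNat lst low) (pvS (high - (mid + 1)).toNat lst (mid + 1)) with hle | hgt
    · rw [if_neg (not_lt.mpr hle), min_eq_left hle]
    · rw [if_pos hgt, min_eq_right (le_of_lt hgt)]
termination_by (high - low).toNat
decreasing_by
  · omega
  · omega

-- folding the running-minimum step commutes with min in the initial value
theorem pvFold_min (lst : List Int) (l : List Int) (c x : Int) :
    l.foldl (fun m i => if (PySem.List.pyGet? lst i).getD 0 < m then (PySem.List.pyGet? lst i).getD 0 else m) (min c x)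
      = min x (l.foldl (fun m i => if (PySem.List.pyGet? lst i).getD 0 < m then (PySem.List.pyGet? lst i).getD 0 else m) c) := by
  induction l generalizing c x with
  | nil => simp [min_comm]
  | cons a t ih =>
      simp only [List.foldl_cons]
      have hstep : ∀ (m : Int),
          (if (PySem.List.pyGet? lst a).getD 0 < m then (PySem.List.pyGet? lst a).getD 0 else m)
            = min m ((PySem.List.pyGet? lst a).getD 0) := by
        intro m
        rcases lt_or_ge ((PySem.List.pyGet? lst a).getD 0) m with h | h
        · rw [if_pos h, min_eq_right (le_of_lt h)]
        · rw [if_neg (not_lt.mpr h), min_eq_left h]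
      rw [hstep, hstep]
      have hsw : min (min c x) ((PySem.List.pyGet? lst a).getD 0)
          = min (min c ((PySem.List.pyGet? lst a).getD 0)) x := by
        rw [min_assoc, min_assoc, min_comm x]
      rw [hsw, ih]

-- B computes pvS on [low, high] too
theorem list_min_alt_eq_pvS (lst : List Int) (low high : Int) (h : low ≤ high) :
    list_min_alt lst low high = pvS (high - low).toNat lst low := by
  unfold list_min_alt
  have hkey : ∀ (n : Nat) (a : Int),
      (PySem.List.pyRange (a + 1) (a + 1 + (n : Int)) 1).foldl
        (fun m i => if (PySem.List.pyGet? lst i).getD 0 < m then (PySem.List.pyGet? lst i).getD 0 else m)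
        (pvG lst a) = pvS n lst a := by
    intro n
    induction n with
    | zero =>
        intro a
        rw [PySem.List.pyRange_one_eq_nil (by omega)]
        rfl
    | succ k ih =>
        intro a
        have hcons : PySem.List.pyRange (a + 1) (a + 1 + ((k : Nat) + 1 : Nat)) 1
            = (a + 1) :: PySem.List.pyRange ((a + 1) + 1) (a + 1 + ((k : Nat) + 1 : Nat)) 1 :=
          PySem.List.pyRange_one_cons (by push_cast; omega)
        rw [hcons]
        simp only [List.foldl_cons]
        have hstep : (if (PySem.List.pyGet? lst (a + 1)).getD 0 < pvG lst a
            then (PySem.List.pyGet? lst (a + 1)).getD 0 else pvG lst a)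
            = min (pvG lst (a + 1)) (pvG lst a) := by
          show (if pvG lst (a + 1) < pvG lst a then pvG lst (a + 1) else pvG lst a) = _
          rcases lt_or_ge (pvG lst (a + 1)) (pvG lst a) with h2 | h2
          · rw [if_pos h2, min_eq_left (le_of_lt h2)]
          · rw [if_neg (not_lt.mpr h2), min_eq_right h2]
        rw [hstep]
        have hb2 : a + 1 + ((k : Nat) + 1 : Nat) = (a + 1) + 1 + ((k : Nat) : Int) := by
          push_cast; ring
        rw [hb2, pvFold_min, ih (a + 1)]
        rfl
  have hb : high + 1 = low + 1 + (((high - low).toNat : Nat) : Int) := by omega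
  rw [hb]
  exact hkey (high - low).toNat low

-- ===== VERDICT (by name: the statement is the Claim_ definition above) =====
theorem list_min_spec : Claim_equal_list_min := by
  intro lst low high _ _
  unfold Spec_list_min
  rcases le_or_gt low high with h | h
  · rw [list_min_eq_pvS lst low high h, list_min_alt_eq_pvS lst low high h]
  · rw [list_min]
    simp only [ge_iff_le, if_pos (le_of_lt h)]
    unfold list_min_alt
    rw [PySem.List.pyRange_one_eq_nil (by omega)]
    rfl
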